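-- pv_equiv track=rewrite | github.com/SiddiqisBoys/barracuda | racko_scoring.py | end
-- ===== SOURCE A (Python) =====
-- def end(hand, opphand):
-- 	seq = 1
-- 	wina = False
-- 	scorea = 5
-- 	mxseqa = 0
-- 	a = hand[0]
-- 	for i in range(1, 20):
-- 		b = hand[i]
-- 		if b == a + 1: seq += 1
-- 		elif b > a: seq = 1
-- 		else: break
-- 		if seq > mxseqa: mxseqa = seq
-- 		scorea += 5
-- 		a = b
-- 	if scorea == 100 and mxseqa >= 5: return 1
-- 	seq = 1
-- 	winb = False
-- 	scoreb = 5
-- 	mxseqb = 0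
-- 	a = opphand[0]
-- 	for i in range(1, 20):
-- 		b = opphand[i]
-- 		if b == a + 1: seq += 1
-- 		elif b > a: seq = 1
-- 		else: break
-- 		if seq > mxseqb: mxseqb = seq
-- 		scoreb += 5
-- 		a = b
-- 	if scoreb == 100 and mxseqb >= 5: return -1
-- 	return 0
-- ===== SOURCE B (Python) =====
-- def wins(h):
--     # fully ascending over indices 1..19 (short-circuits exactly like A's break)
--     if not all(h[i] > h[i - 1] for i in range(1, 20)):
--         return False
--     # second pass: longest +1-consecutive run
--     run = best = 1
--     for i in range(1, 20):
--         if h[i] == h[i - 1] + 1: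
--             run += 1
--             if run > best:
--                 best = run
--         else:
--             run = 1
--     return best >= 5
--
--
-- def end(hand, opphand):
--     if wins(hand):
--         return 1
--     if wins(opphand):
--         return -1
--     return 0
-- ===== Notes on version B (the rewrite author's own statement) =====
-- stated objective: simpler
-- what changed: Replaces A's duplicated intertwined score/break/run loops by one shared wins() predicate: a short-circuiting ascending check plus a separate longest-run pass, with no score arithmetic at all.
import Mathlib
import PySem

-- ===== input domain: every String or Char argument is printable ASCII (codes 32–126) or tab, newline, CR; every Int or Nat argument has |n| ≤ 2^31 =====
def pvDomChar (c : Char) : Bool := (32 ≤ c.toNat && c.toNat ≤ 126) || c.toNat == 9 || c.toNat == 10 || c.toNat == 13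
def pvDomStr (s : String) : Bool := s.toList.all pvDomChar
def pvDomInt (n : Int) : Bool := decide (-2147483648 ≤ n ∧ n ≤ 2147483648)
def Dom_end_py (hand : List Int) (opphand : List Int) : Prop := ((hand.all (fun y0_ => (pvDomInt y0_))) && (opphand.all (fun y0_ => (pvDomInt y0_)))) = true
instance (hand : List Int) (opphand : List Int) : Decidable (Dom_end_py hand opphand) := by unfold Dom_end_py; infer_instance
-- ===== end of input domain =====

-- B replaces A's two duplicated intertwined score/break/run loops by one shared wins()
-- predicate (an ascending check plus a separate longest-run pass); objective: simpler.


-- ===== PORT A =====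
-- A's for-loop over range(1, 20) with break: fuel = remaining iterations, i = current index;
-- state (seq, mxseq, score, a) exactly as in the Python. pyGet? = none is Python's IndexError
-- (excluded by Pre_); the loop then stops with its current state, which the proof never relies on.
def endLoop (h : List Int) : Nat → Nat → Int → Int → Int → Int → Int × Int
  | 0, _, _, mxseq, score, _ => (score, mxseq)
  | f + 1, i, seq, mxseq, score, a =>
    match PySem.List.pyGet? h (Int.ofNat i) with
    | none => (score, mxseq)
    | some b =>
      if b = a + 1 then
        let seq := seq + 1
        let mxseq := if seq > mxseq then seq else mxseq
        endLoop h f (i + 1) seq mxseq (score + 5) b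
      else if b > a then
        let seq : Int := 1
        let mxseq := if seq > mxseq then seq else mxseq
        endLoop h f (i + 1) seq mxseq (score + 5) b
      else (score, mxseq)

def end_py (hand : List Int) (opphand : List Int) : Int :=
  match PySem.List.pyGet? hand 0 with
  | none => 0   -- IndexError hand[0]; excluded by Pre_
  | some a =>
    let r := endLoop hand 19 1 1 0 5 a
    if r.1 = 100 ∧ r.2 ≥ 5 then 1
    else
      match PySem.List.pyGet? opphand 0 with
      | none => 0   -- IndexError opphand[0]; excluded by Pre_
      | some a' =>
        let r' := endLoop opphand 19 1 1 0 5 a'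
        if r'.1 = 100 ∧ r'.2 ≥ 5 then -1 else 0

-- ===== PORT B =====
-- all(h[i] > h[i-1] for i in range(1, 20)): h[i] is read first, then h[i-1], short-circuiting.
def ascB (h : List Int) : Nat → Nat → Bool
  | 0, _ => true
  | f + 1, i =>
    match PySem.List.pyGet? h (Int.ofNat i) with
    | none => false   -- IndexError h[i]
    | some b =>
      match PySem.List.pyGet? h (Int.ofNat (i - 1)) with
      | none => false
      | some a => if a < b then ascB h f (i + 1) else false

-- second pass of wins(): longest run of h[i] == h[i-1] + 1 (only reached when fully ascending,
-- so the out-of-range default branch is never taken there).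
def runBest (h : List Int) : Nat → Nat → Int → Int → Int
  | 0, _, _, best => best
  | f + 1, i, run, best =>
    match PySem.List.pyGet? h (Int.ofNat i), PySem.List.pyGet? h (Int.ofNat (i - 1)) with
    | some b, some a =>
      if b = a + 1 then
        let run := run + 1
        let best := if run > best then run else best
        runBest h f (i + 1) run best
      else runBest h f (i + 1) 1 best
    | _, _ => best

def winsB (h : List Int) : Bool :=
  ascB h 19 1 && decide ((5 : Int) ≤ runBest h 19 1 1 1)

def end_py_alt (hand : List Int) (opphand : List Int) : Int :=
  if winsB hand then 1 else if winsB opphand then -1 else 0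

-- ===== PRECONDITION & SPEC =====
-- A raises IndexError when a hand's traversal runs off the end before a non-increase: a hand is
-- traversed safely iff it is nonempty and either has ≥ 20 elements or contains a non-increase.
def pySafe (h : List Int) : Prop :=
  1 ≤ h.length ∧ (20 ≤ h.length ∨ ¬ List.IsChain (· < ·) h)

-- closed form of "hand scores 100 with a run of ≥ 5", i.e. A returns 1 without reading opphand
def WinsP (h : List Int) : Prop :=
  20 ≤ h.length ∧ List.IsChain (· < ·) (h.take 20) ∧
    ∃ j, j < 16 ∧ ∀ k, k < 4 → h[j + k + 1]! = h[j + k]! + 1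

-- Pre_ = exactly the inputs where Python A returns: hand traversed safely, and opphand is only
-- reached (by A and by B alike) when hand does not win outright.
def Pre_end_py (hand : List Int) (opphand : List Int) : Prop :=
  pySafe hand ∧ (WinsP hand ∨ pySafe opphand)
instance (hand : List Int) (opphand : List Int) : Decidable (Pre_end_py hand opphand) := by
  unfold Pre_end_py pySafe WinsP; infer_instance

def pvWitness_end_py : List Int × List Int := ([2, 1], [2, 1])

def Spec_end_py (hand : List Int) (opphand : List Int) (out : Int) : Prop := out = end_py_alt hand opphand
instance (hand : List Int) (opphand : List Int) (out : Int) : Decidable (Spec_end_py hand opphand out) := by unfold Spec_end_py; infer_instance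

-- ===== CLAIM (what is proved, stated in full; the proofs are below) =====
def Claim_equal_end_py : Prop := ∀ (hand : List Int) (opphand : List Int), Dom_end_py hand opphand → Pre_end_py hand opphand → Spec_end_py hand opphand (end_py hand opphand)

-- ===== LEMMAS AND PROOFS =====

-- in-range lookup as a Nat-indexed getElem!
theorem hsome (h : List Int) (n : Nat) (hn : n < h.length) :
    PySem.List.pyGet? h (Int.ofNat n) = some h[n]! := by
  simp [PySem.List.pyGet?_natCast, List.getElem?_eq_getElem hn]

-- nonempty list: the first index read succeeds
theorem pyGet0 (h : List Int) (hh : 1 ≤ h.length) :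
    ∃ a, PySem.List.pyGet? h 0 = some a := by
  cases h with
  | nil => simp at hh
  | cons x t => exact ⟨x, PySem.List.pyGet?_zero_cons x t⟩

-- Joint invariant of A's loop and B's two passes, for any list h:
-- if the ascending check succeeds for the remaining f steps, A's loop completes (score grows by
-- exactly 5*f) and B's run pass computes A's mxseq up to ⊔ 1; otherwise A's loop stops early.
theorem loop_main (h : List Int) : ∀ (f i : Nat) (seq mx sc a : Int),
    PySem.List.pyGet? h (Int.ofNat (i - 1)) = some a → 1 ≤ i →
    (ascB h f i = true →
      (endLoop h f i seq mx sc a).1 = sc + 5 * (f : Int) ∧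
      runBest h f i seq (max mx 1) = max (endLoop h f i seq mx sc a).2 1) ∧
    (ascB h f i = false → (endLoop h f i seq mx sc a).1 < sc + 5 * (f : Int)) := by
  intro f
  induction f with
  | zero =>
    intro i seq mx sc a _ _
    refine ⟨fun _ => ⟨by simp [endLoop], by simp [endLoop, runBest]⟩, fun hf => ?_⟩
    simp [ascB] at hf
  | succ f ih =>
    intro i seq mx sc a ha hi
    rcases hb : PySem.List.pyGet? h (Int.ofNat i) with _ | b
    · refine ⟨fun hasc => ?_, fun _ => ?_⟩
      · simp only [ascB, hb] at hasc
        cases hasc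
      · simp only [endLoop, hb]
        push_cast; omega
    · have ha' : PySem.List.pyGet? h (Int.ofNat (i + 1 - 1)) = some b := by
        have e : i + 1 - 1 = i := by omega
        rw [e]; exact hb
      by_cases hb1 : b = a + 1
      · have hlt : a < b := by omega
        have key := ih (i + 1) (seq + 1) (if seq + 1 > mx then seq + 1 else mx) (sc + 5) b ha' (by omega)
        have easc : ascB h (f + 1) i = ascB h f (i + 1) := by
          simp only [ascB, hb, ha, if_pos hlt]
        have eloop : endLoop h (f + 1) i seq mx sc a
            = endLoop h f (i + 1) (seq + 1) (if seq + 1 > mx then seq + 1 else mx) (sc + 5) b := by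
          simp only [endLoop, hb, if_pos hb1]
        have erun : runBest h (f + 1) i seq (max mx 1)
            = runBest h f (i + 1) (seq + 1) (max (if seq + 1 > mx then seq + 1 else mx) 1) := by
          have emax : (if seq + 1 > max mx 1 then seq + 1 else max mx 1)
              = max (if seq + 1 > mx then seq + 1 else mx) 1 := by
            simp only [max_def]; split_ifs <;> omega
          simp only [runBest, hb, ha, if_pos hb1, emax]
        rw [easc, eloop, erun]
        refine ⟨fun hasc => ?_, fun hasc => ?_⟩
        · obtain ⟨h1, h2⟩ := key.1 hasc
          refine ⟨by rw [h1]; push_cast; ring, h2⟩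
        · have := key.2 hasc
          push_cast at this ⊢; omega
      · by_cases hgt : a < b
        · have key := ih (i + 1) 1 (if (1 : Int) > mx then 1 else mx) (sc + 5) b ha' (by omega)
          have easc : ascB h (f + 1) i = ascB h f (i + 1) := by
            simp only [ascB, hb, ha, if_pos hgt]
          have eloop : endLoop h (f + 1) i seq mx sc a
              = endLoop h f (i + 1) 1 (if (1 : Int) > mx then 1 else mx) (sc + 5) b := by
            simp only [endLoop, hb, if_neg hb1, if_pos hgt]
          have erun : runBest h (f + 1) i seq (max mx 1)
              = runBest h f (i + 1) 1 (max (if (1 : Int) > mx then 1 else mx) 1) := by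
            have emax : max mx 1 = max (if (1 : Int) > mx then 1 else mx) 1 := by
              simp only [max_def]; split_ifs <;> omega
            simp only [runBest, hb, ha, if_neg hb1]
            rw [emax]
          rw [easc, eloop, erun]
          refine ⟨fun hasc => ?_, fun hasc => ?_⟩
          · obtain ⟨h1, h2⟩ := key.1 hasc
            refine ⟨by rw [h1]; push_cast; ring, h2⟩
          · have := key.2 hasc
            push_cast at this ⊢; omega
        · have easc : ascB h (f + 1) i = false := by
            simp only [ascB, hb, ha, if_neg hgt]
          refine ⟨fun hasc => ?_, fun _ => ?_⟩
          · rw [easc] at hasc; cases hasc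
          · have eloop : endLoop h (f + 1) i seq mx sc a = (sc, mx) := by
              simp only [endLoop, hb, if_neg hb1, if_neg hgt]
            rw [eloop]; push_cast; omega

-- hand-part win condition of A ↔ winsB, whenever the first index reads successfully
theorem hand_win_iff (h : List Int) (a : Int) (ha : PySem.List.pyGet? h 0 = some a) :
    (((endLoop h 19 1 1 0 5 a).1 = 100 ∧ (endLoop h 19 1 1 0 5 a).2 ≥ 5) ↔ winsB h = true) := by
  have ha0 : PySem.List.pyGet? h (Int.ofNat (1 - 1)) = some a := by simpa using ha
  have key := loop_main h 19 1 1 0 5 a ha0 (by omega)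
  by_cases hasc : ascB h 19 1 = true
  · obtain ⟨h1, h2⟩ := key.1 hasc
    have e1 : (5 : Int) + 5 * ((19 : Nat) : Int) = 100 := by norm_num
    rw [e1] at h1
    have e2 : max (0 : Int) 1 = 1 := by norm_num
    rw [e2] at h2
    simp only [winsB, hasc, Bool.true_and, decide_eq_true_eq, h2]
    constructor
    · rintro ⟨-, hmx⟩
      omega
    · intro hr
      exact ⟨h1, by omega⟩
  · have hf : ascB h 19 1 = false := by simpa using hasc
    have h3 := key.2 hf
    have e1 : (5 : Int) + 5 * ((19 : Nat) : Int) = 100 := by norm_num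
    rw [e1] at h3
    simp only [winsB, hf, Bool.false_and]
    constructor
    · rintro ⟨h100, -⟩; omega
    · intro hc; cases hc

-- WinsP part 1: a fully ascending 20-prefix makes B's ascending pass succeed
theorem asc_all (h : List Int) (hlen : 20 ≤ h.length)
    (H : ∀ j : Nat, j + 1 < 20 → h[j]! < h[j + 1]!) :
    ∀ f i, 1 ≤ i → i + f ≤ 20 → ascB h f i = true := by
  intro f
  induction f with
  | zero => intro i _ _; simp [ascB]
  | succ f ih =>
    intro i hi hif
    have hi20 : i < 20 := by omega
    have hbi := hsome h i (by omega)
    have hai := hsome h (i - 1) (by omega)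
    have hcmp : h[i - 1]! < h[i]! := by
      have := H (i - 1) (by omega)
      have e : i - 1 + 1 = i := by omega
      rwa [e] at this
    simp only [ascB, hbi, hai, if_pos hcmp]
    exact ih (i + 1) (by omega) (by omega)

-- B's run pass never lowers best
theorem runBest_ge_best (h : List Int) : ∀ (f i : Nat) (run best : Int),
    best ≤ runBest h f i run best := by
  intro f
  induction f with
  | zero => intro i run best; simp [runBest]
  | succ f ih =>
    intro i run best
    rcases hb : PySem.List.pyGet? h (Int.ofNat i) with _ | b
    · simp only [runBest, hb]
      exact le_refl best
    · rcases ha : PySem.List.pyGet? h (Int.ofNat (i - 1)) with _ | a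
      · simp only [runBest, hb, ha]
        exact le_refl best
      · by_cases hd : b = a + 1
        · simp only [runBest, hb, ha, if_pos hd]
          refine le_trans ?_ (ih (i + 1) (run + 1) (if run + 1 > best then run + 1 else best))
          split_ifs <;> omega
        · simp only [runBest, hb, ha, if_neg hd]
          exact ih (i + 1) 1 best

-- a streak of k consecutive +1 steps pushes best up by k
theorem runBest_streak (h : List Int) (hlen : 20 ≤ h.length) :
    ∀ (k f i : Nat) (run best : Int), k ≤ f → 1 ≤ i → i + k ≤ 20 → run ≤ best →
      (∀ t, t < k → h[i + t]! = h[i + t - 1]! + 1) →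
      run + k ≤ runBest h f i run best := by
  intro k
  induction k with
  | zero =>
    intro f i run best _ _ _ hrb _
    simpa using le_trans hrb (runBest_ge_best h f i run best)
  | succ k ih =>
    intro f i run best hkf hi hik hrb hdiff
    obtain ⟨f', rfl⟩ : ∃ f', f = f' + 1 := ⟨f - 1, by omega⟩
    have hbi := hsome h i (by omega)
    have hai := hsome h (i - 1) (by omega)
    have hd : h[i]! = h[i - 1]! + 1 := by
      have := hdiff 0 (by omega)
      simpa using this
    simp only [runBest, hbi, hai, if_pos hd]
    have hrec := ih f' (i + 1) (run + 1) (if run + 1 > best then run + 1 else best)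
      (by omega) (by omega) (by omega) (by split_ifs <;> omega) ?_
    · omega
    · intro t ht
      have := hdiff (t + 1) (by omega)
      have e1 : i + 1 + t = i + (t + 1) := by omega
      rw [e1]; exact this

-- reach the streak: from any point at or before it, best ends up ≥ 5
theorem runBest_reach (h : List Int) (hlen : 20 ≤ h.length) (j : Nat) (hj : j < 16)
    (hdiff : ∀ k, k < 4 → h[j + k + 1]! = h[j + k]! + 1) :
    ∀ (f i : Nat) (run best : Int), 1 ≤ i → 1 ≤ run → run ≤ best → i ≤ j + 1 → j + 5 ≤ i + f →
      5 ≤ runBest h f i run best := by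
  intro f
  induction f with
  | zero => intro i run best _ _ _ hij hreach; omega
  | succ f ih =>
    intro i run best hi hrun hrb hij hreach
    by_cases he : i = j + 1
    · subst he
      have := runBest_streak h hlen 4 (f + 1) (j + 1) run best (by omega) (by omega) (by omega) hrb ?_
      · omega
      · intro t ht
        have := hdiff t ht
        have e1 : j + 1 + t = j + t + 1 := by omega
        rw [e1, show j + t + 1 - 1 = j + t from by omega]; exact this
    · have hij' : i ≤ j := by omega
      have hbi := hsome h i (by omega)
      have hai := hsome h (i - 1) (by omega)
      by_cases hd : h[i]! = h[i - 1]! + 1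
      · simp only [runBest, hbi, hai, if_pos hd]
        exact ih (i + 1) (run + 1) (if run + 1 > best then run + 1 else best)
          (by omega) (by omega) (by split_ifs <;> omega) (by omega) (by omega)
      · simp only [runBest, hbi, hai, if_neg hd]
        exact ih (i + 1) 1 best (by omega) (by omega) (by omega) (by omega) (by omega)

-- WinsP implies B's win predicate
theorem winsB_of_WinsP (h : List Int) (hw : WinsP h) : winsB h = true := by
  obtain ⟨hlen, hchain, j, hj, hdiff⟩ := hw
  have hlt : (List.take 20 h).length = 20 := by simp [hlen]
  have H : ∀ j' : Nat, j' + 1 < 20 → h[j']! < h[j' + 1]! := by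
    intro j' hj'
    have hc := List.isChain_iff_getElem.mp hchain j' (by omega)
    rw [List.getElem_take, List.getElem_take] at hc
    rw [getElem!_pos h j' (by omega), getElem!_pos h (j' + 1) (by omega)]
    exact hc
  have hasc : ascB h 19 1 = true := asc_all h hlen H 19 1 (by omega) (by omega)
  have hrun : (5 : Int) ≤ runBest h 19 1 1 1 :=
    runBest_reach h hlen j hj hdiff 19 1 1 1 (by omega) (by omega) (by omega) (by omega) (by omega)
  simp [winsB, hasc, hrun]

-- ===== VERDICT (by name: the statement is the Claim_ definition above) =====
theorem end_py_spec : Claim_equal_end_py := by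
  intro hand opphand _ hpre
  unfold Spec_end_py
  obtain ⟨⟨hh1, _⟩, hor⟩ := hpre
  obtain ⟨a, ha⟩ := pyGet0 hand hh1
  simp only [end_py, end_py_alt, ha]
  by_cases hw : winsB hand = true
  · rw [if_pos ((hand_win_iff hand a ha).mpr hw), if_pos hw]
  · have hw' : winsB hand = false := by simpa using hw
    rw [if_neg (fun hc => hw ((hand_win_iff hand a ha).mp hc)), if_neg (by simp [hw'])]
    have hsafe : pySafe opphand := by
      rcases hor with hwin | hsafe
      · exact absurd (winsB_of_WinsP hand hwin) hw
      · exact hsafe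
    obtain ⟨a', ha'⟩ := pyGet0 opphand hsafe.1
    simp only [ha']
    by_cases hw2 : winsB opphand = true
    · rw [if_pos ((hand_win_iff opphand a' ha').mpr hw2), if_pos hw2]
    · have hw2' : winsB opphand = false := by simpa using hw2
      rw [if_neg (fun hc => hw2 ((hand_win_iff opphand a' ha').mp hc)), if_neg (by simp [hw2'])]
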